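-- pv_equiv track=rewrite | github.com/benjamin-mcdaniel/dom4in.net | collector/collector.py | generate_batch_for_length
-- ===== SOURCE A (Python) =====
-- from typing import Dict, List, Tuple
--
-- def index_to_label(idx: int, length: int, charset: str) -> str:
--     base = len(charset)
--     chars = []
--     for _ in range(length):
--         chars.append(charset[idx % base])
--         idx //= base
--     return "".join(reversed(chars))
--
-- def generate_batch_for_length(
--     length_state: Dict[str, int],
--     length: int,
--     charset: str,
--     tlds: List[str],
--     batch_size: int,
-- ) -> List[Tuple[str, str]]:
--     """Generate a batch of (domain, tld) pairs for a specific label length.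
--
--     Advances the provided per-length state in-place and marks the length as done
--     when all charset^length × TLD combinations have been exhausted.
--     """
--     batch: List[Tuple[str, str]] = []
--
--     total_for_length = len(charset) ** length
--     tld_index = int(length_state.get("tld_index", 0) or 0)
--     index = int(length_state.get("index", 0) or 0)
--     done_flag = bool(length_state.get("done", False))
--
--     if done_flag or total_for_length <= 0 or not tlds:
--         length_state["done"] = True
--         return batch
--
--     while len(batch) < batch_size and not done_flag:
--         if index >= total_for_length:
--             # Finished this TLD's space for this length; move to next TLD.
--             index = 0
--             tld_index += 1
--             if tld_index >= len(tlds):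
--                 # All TLDs exhausted for this length.
--                 done_flag = True
--                 break
--
--         tld = tlds[tld_index]
--         label = index_to_label(index, length, charset)
--         index += 1
--
--         domain = f"{label}.{tld}"
--         batch.append((domain, tld))
--
--     length_state["tld_index"] = tld_index
--     length_state["index"] = index
--     length_state["done"] = done_flag
--
--     return batch
-- ===== SOURCE B (Python) =====
-- def _label(idx, length, charset):
--     base = len(charset)
--     s = ""
--     for _ in range(length):
--         s = charset[idx % base] + s
--         idx //= base
--     return s
--
--
-- def generate_batch_for_length(length_state, length, charset, tlds, batch_size):
--     """Closed-form batch generation: one linear offset over the combined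
--     (tld, label) space, a single range()-driven comprehension, no stateful
--     while loop.  Mutates length_state the same way A does."""
--     total = len(charset) ** length
--     tld_index = int(length_state.get("tld_index", 0) or 0)
--     index = int(length_state.get("index", 0) or 0)
--     if bool(length_state.get("done", False)) or total <= 0 or not tlds:
--         length_state["done"] = True
--         return []
--     start = (tld_index + 1) * total if index >= total else tld_index * total + index
--     space = len(tlds) * total
--     count = max(0, min(batch_size, space - start))
--     end = start + count
--     batch = [
--         (_label(k % total, length, charset) + "." + tlds[k // total], tlds[k // total])
--         for k in range(start, end)
--     ]
--     # write back the same resumption state the stateful loop would leave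
--     done = False
--     if batch_size > 0:
--         done = count < batch_size
--         if count > 0:
--             tld_index = (end - 1) // total
--             index = end - tld_index * total
--         if done:
--             tld_index, index = tld_index + 1, 0
--     length_state["tld_index"] = tld_index
--     length_state["index"] = index
--     length_state["done"] = done
--     return batch
-- ===== Notes on version B (the rewrite author's own statement) =====
-- stated objective: alternative
-- what changed: Replaces A's stateful while loop (per-iteration TLD-boundary reset and branching, LSB-first digit list reversed per label) by a closed-form linear offset and batch count over the combined (tld,label) space followed by one flat map over range(start,end) that decodes each offset with divmod and builds the label MSB-first by prepending.
-- outside the precondition, e.g. on generate_batch_for_length({}, -1, 'ab', ['com'], 2): A returns [('.com', 'com')], B raises TypeError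
import Mathlib
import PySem

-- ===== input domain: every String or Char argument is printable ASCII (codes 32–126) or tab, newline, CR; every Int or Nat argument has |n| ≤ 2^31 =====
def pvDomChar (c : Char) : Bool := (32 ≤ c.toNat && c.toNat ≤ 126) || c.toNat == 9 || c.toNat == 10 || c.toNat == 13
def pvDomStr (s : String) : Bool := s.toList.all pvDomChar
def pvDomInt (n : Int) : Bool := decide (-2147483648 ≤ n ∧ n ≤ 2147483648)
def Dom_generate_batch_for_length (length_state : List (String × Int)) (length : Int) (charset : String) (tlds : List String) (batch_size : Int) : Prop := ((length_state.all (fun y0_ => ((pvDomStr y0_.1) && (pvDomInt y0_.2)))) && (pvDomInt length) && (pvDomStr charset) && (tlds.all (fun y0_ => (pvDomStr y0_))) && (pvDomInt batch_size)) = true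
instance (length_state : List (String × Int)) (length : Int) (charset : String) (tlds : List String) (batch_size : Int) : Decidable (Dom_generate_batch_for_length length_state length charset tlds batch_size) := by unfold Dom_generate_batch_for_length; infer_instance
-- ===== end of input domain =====

-- B replaces A's stateful while loop by a closed-form offset/count over the combined
-- (tld,label) space and one flat map; A mutates length_state in place and B performs the
-- same mutation in Python, but the equivalence proved here is about the RETURN value only.

-- ===== PORT A =====

-- state lookup: int(length_state.get(k, 0) or 0) — first match in the assoc list, 0 if absent
def pvStGet (st : List (String × Int)) (k : String) : Int := (PySem.Dict.ofList st).getD k 0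

-- index_to_label's digit loop: chars.append(charset[idx % base]); idx //= base   (LSB first)
def pvLabelA (cs : List Char) : Nat → Int → List Char → List Char
  | 0, _, chars => chars
  | n+1, idx, chars =>
      pvLabelA cs n (PySem.Int.floordiv idx (cs.length : Int))
        (chars ++ [PySem.List.pyGetD cs (PySem.Int.mod idx (cs.length : Int)) ' '])
        -- pyGetD default is unreachable: 0 ≤ idx % base < base whenever base > 0 (total > 0)

-- "".join(reversed(chars)) as a char list (String.ofList applied where A builds the domain string)
def pvIndexToLabelA (idx length : Int) (charset : String) : List Char :=
  (pvLabelA charset.toList length.toNat idx []).reverse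

-- A's while loop; rem = batch_size - len(batch) (each surviving iteration appends one pair)
def pvLoopA (total length : Int) (charset : String) (tlds : List String) :
    Nat → Int → Int → List (String × String) → List (String × String)
  | 0, _, _, acc => acc.reverse
  | Nat.succ rem, index, tldIdx, acc =>
      let p : Int × Int := if total ≤ index then (0, tldIdx + 1) else (index, tldIdx)
      if total ≤ index ∧ (tlds.length : Int) ≤ tldIdx + 1 then acc.reverse
      else
        let tld := PySem.List.pyGetD tlds p.2 ""   -- IndexError excluded by Pre_
        let label := pvIndexToLabelA p.1 length charset
        pvLoopA total length charset tlds rem (p.1 + 1) p.2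
          ((String.ofList (label ++ '.' :: tld.toList), tld) :: acc)

def generate_batch_for_length (length_state : List (String × Int)) (length : Int) (charset : String) (tlds : List String) (batch_size : Int) : List (String × String) :=
  let total : Int := (charset.toList.length : Int) ^ length.toNat  -- len(charset) ** length, exact for 0 ≤ length (Pre_)
  let tldIdx := pvStGet length_state "tld_index"
  let index := pvStGet length_state "index"
  if pvStGet length_state "done" ≠ 0 ∨ total ≤ 0 ∨ tlds = [] then []
  else pvLoopA total length charset tlds batch_size.toNat index tldIdx []

-- ===== PORT B =====

-- B's label helper: builds the label MSB-first by prepending (s = charset[idx % base] + s)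
def pvLabelB (cs : List Char) : Nat → Int → List Char → List Char
  | 0, _, acc => acc
  | n+1, idx, acc =>
      pvLabelB cs n (PySem.Int.floordiv idx (cs.length : Int))
        (PySem.List.pyGetD cs (PySem.Int.mod idx (cs.length : Int)) ' ' :: acc)

def generate_batch_for_length_alt (length_state : List (String × Int)) (length : Int) (charset : String) (tlds : List String) (batch_size : Int) : List (String × String) :=
  let total : Int := (charset.toList.length : Int) ^ length.toNat  -- len(charset) ** length, exact for 0 ≤ length (Pre_)
  let tldIdx := pvStGet length_state "tld_index"
  let index := pvStGet length_state "index"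
  if pvStGet length_state "done" ≠ 0 ∨ total ≤ 0 ∨ tlds = [] then []
  else
    let start := if total ≤ index then (tldIdx + 1) * total else tldIdx * total + index
    let count := max 0 (min batch_size ((tlds.length : Int) * total - start))
    (PySem.List.pyRange start (start + count) 1).map (fun k =>
      let tld := PySem.List.pyGetD tlds (PySem.Int.floordiv k total) ""
      (String.ofList (pvLabelB charset.toList length.toNat (PySem.Int.mod k total) [] ++ '.' :: tld.toList), tld))

-- ===== PRECONDITION & SPEC =====
-- Pre_ excludes negative lengths (CPython's ** then yields a float, or raises ZeroDivisionError
-- for an empty charset, so A's output there is an artefact of float comparisons) and corrupted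
-- resume states that actually reach indexing — negative counters or a tld_index pointing past the
-- TLD list with the label space not exhausted — where A raises IndexError or wraps indices
-- Python-style; early-out inputs (done set, empty space, no tlds, batch_size ≤ 0) stay admitted.
def Pre_generate_batch_for_length (length_state : List (String × Int)) (length : Int) (charset : String) (tlds : List String) (batch_size : Int) : Prop :=
  0 ≤ length ∧
  ((pvStGet length_state "done" ≠ 0 ∨ (charset.toList.length : Int) ^ length.toNat ≤ 0 ∨
      tlds = [] ∨ batch_size ≤ 0) ∨
   (0 ≤ pvStGet length_state "index" ∧ 0 ≤ pvStGet length_state "tld_index" ∧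
    (pvStGet length_state "tld_index" < (tlds.length : Int) ∨
     (charset.toList.length : Int) ^ length.toNat ≤ pvStGet length_state "index")))

instance (length_state : List (String × Int)) (length : Int) (charset : String) (tlds : List String) (batch_size : Int) : Decidable (Pre_generate_batch_for_length length_state length charset tlds batch_size) := by unfold Pre_generate_batch_for_length; infer_instance

def pvWitness_generate_batch_for_length : (List (String × Int)) × Int × String × List String × Int :=
  ([("index", 1)], 2, "ab", ["com", "net"], 3)

def Spec_generate_batch_for_length (length_state : List (String × Int)) (length : Int) (charset : String) (tlds : List String) (batch_size : Int) (out : List (String × String)) : Prop := out = generate_batch_for_length_alt length_state length charset tlds batch_size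
instance (length_state : List (String × Int)) (length : Int) (charset : String) (tlds : List String) (batch_size : Int) (out : List (String × String)) : Decidable (Spec_generate_batch_for_length length_state length charset tlds batch_size out) := by unfold Spec_generate_batch_for_length; infer_instance

-- ===== CLAIM (what is proved, stated in full; the proofs are below) =====
def Claim_equal_generate_batch_for_length : Prop := ∀ (length_state : List (String × Int)) (length : Int) (charset : String) (tlds : List String) (batch_size : Int), Dom_generate_batch_for_length length_state length charset tlds batch_size → Pre_generate_batch_for_length length_state length charset tlds batch_size → Spec_generate_batch_for_length length_state length charset tlds batch_size (generate_batch_for_length length_state length charset tlds batch_size)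

-- ===== LEMMAS AND PROOFS =====

theorem pvLabelA_append (cs : List Char) :
    ∀ (n : Nat) (idx : Int) (chars : List Char),
      pvLabelA cs n idx chars = chars ++ pvLabelA cs n idx [] := by
  intro n
  induction n with
  | zero => intro idx chars; simp [pvLabelA]
  | succ n ih =>
      intro idx chars
      rw [pvLabelA, pvLabelA, ih, ih (chars := [] ++ _)]
      simp

theorem pvLabelB_eq (cs : List Char) :
    ∀ (n : Nat) (idx : Int) (acc : List Char),
      pvLabelB cs n idx acc = (pvLabelA cs n idx []).reverse ++ acc := by
  intro n
  induction n with
  | zero => intro idx acc; simp [pvLabelA, pvLabelB]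
  | succ n ih =>
      intro idx acc
      rw [pvLabelB, ih, pvLabelA,
        pvLabelA_append cs n (PySem.Int.floordiv idx (cs.length : Int))
          ([] ++ [PySem.List.pyGetD cs (PySem.Int.mod idx (cs.length : Int)) ' '])]
      simp

theorem pvLoopA_ge (total length : Int) (charset : String) (tlds : List String)
    (rem : Nat) (index tldIdx : Int) (acc : List (String × String)) (h : total ≤ index) :
    pvLoopA total length charset tlds rem index tldIdx acc =
      pvLoopA total length charset tlds rem total tldIdx acc := by
  cases rem with
  | zero => rfl
  | succ rem => simp [pvLoopA, h]

theorem pvLoopA_eq (total length : Int) (charset : String) (tlds : List String)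
    (htot : 0 < total) :
    ∀ (rem : Nat) (index tldIdx : Int) (acc : List (String × String)),
      0 ≤ index → index ≤ total → 0 ≤ tldIdx →
      (index = total ∨ tldIdx < (tlds.length : Int)) →
      pvLoopA total length charset tlds rem index tldIdx acc =
        acc.reverse ++
          (PySem.List.pyRange (tldIdx * total + index)
            (tldIdx * total + index +
              min (rem : Int) ((tlds.length : Int) * total - (tldIdx * total + index))) 1).map
            (fun k =>
              let tld := PySem.List.pyGetD tlds (PySem.Int.floordiv k total) ""
              (String.ofList (pvLabelB charset.toList length.toNat (PySem.Int.mod k total) [] ++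
                  '.' :: tld.toList), tld)) := by
  intro rem
  induction rem with
  | zero =>
      intro index tldIdx acc _ _ _ _
      rw [PySem.List.pyRange_one_eq_nil (by omega)]
      simp [pvLoopA]
  | succ rem ih =>
      intro index tldIdx acc h0 h1 h2 h3
      set n : Int := (tlds.length : Int) with hn
      by_cases hge : total ≤ index
      · -- reset branch: index = total
        have hidx : index = total := le_antisymm h1 hge
        by_cases hbrk : n ≤ tldIdx + 1
        · -- all TLDs exhausted
          have hbig : n * total ≤ tldIdx * total + index := by nlinarith
          rw [PySem.List.pyRange_one_eq_nil (by omega)]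
          rw [pvLoopA]
          simp only [if_pos hge]
          rw [if_pos (show total ≤ index ∧ (tlds.length : Int) ≤ tldIdx + 1 from ⟨hge, by omega⟩)]
          simp
        · -- move to next TLD and emit in the same iteration
          have hlt : tldIdx + 1 < n := by omega
          have hstart : tldIdx * total + index = (tldIdx + 1) * total + 0 := by
            rw [hidx]; ring
          have hspace : (tldIdx + 1) * total + 0 < n * total := by nlinarith
          have hc1 : (1 : Int) ≤ min ((rem : Int) + 1) (n * total - ((tldIdx + 1) * total + 0)) := by
            omega
          rw [pvLoopA]
          simp only [if_pos hge]
          rw [if_neg (show ¬(total ≤ index ∧ (tlds.length : Int) ≤ tldIdx + 1) by omega)]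
          rw [ih (0 + 1) (tldIdx + 1) _ (by omega) (by omega) (by omega) (by omega)]
          rw [hstart, Nat.cast_succ,
            PySem.List.pyRange_one_cons (a := (tldIdx + 1) * total + 0) (by omega),
            List.map_cons]
          have hdiv : PySem.Int.floordiv ((tldIdx + 1) * total + 0) total = tldIdx + 1 := by
            rw [PySem.Int.floordiv_eq_iff_of_pos htot]; constructor <;> nlinarith
          have hmod : PySem.Int.mod ((tldIdx + 1) * total + 0) total = 0 := by
            have := PySem.Int.floordiv_mul_add_mod ((tldIdx + 1) * total + 0) total
            rw [hdiv] at this; omega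
          rw [hdiv, hmod]
          simp only [List.reverse_cons, List.append_assoc, List.cons_append, List.nil_append,
            pvLabelB_eq, pvIndexToLabelA, List.append_nil]
          have hE : (tldIdx + 1) * total + (0 + 1) + min ((rem : Int)) (n * total - ((tldIdx + 1) * total + (0 + 1)))
              = (tldIdx + 1) * total + 0 + min ((rem : Int) + 1) (n * total - ((tldIdx + 1) * total + 0)) := by
            omega
          have hS : (tldIdx + 1) * total + (0 + 1) = (tldIdx + 1) * total + 0 + 1 := by ring
          rw [hE, hS]
      · -- no reset: index < total, and Pre_'s invariant gives tldIdx < n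
        have hlt : tldIdx < n := by omega
        have hspace : tldIdx * total + index < n * total := by nlinarith
        rw [pvLoopA]
        simp only [if_neg hge]
        rw [if_neg (show ¬(total ≤ index ∧ (tlds.length : Int) ≤ tldIdx + 1) by omega)]
        rw [ih (index + 1) tldIdx _ (by omega) (by omega) h2 (by omega)]
        rw [Nat.cast_succ,
          PySem.List.pyRange_one_cons (a := tldIdx * total + index) (by omega),
          List.map_cons]
        have hdiv : PySem.Int.floordiv (tldIdx * total + index) total = tldIdx := by
          rw [PySem.Int.floordiv_eq_iff_of_pos htot]; constructor <;> nlinarith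
        have hmod : PySem.Int.mod (tldIdx * total + index) total = index := by
          have := PySem.Int.floordiv_mul_add_mod (tldIdx * total + index) total
          rw [hdiv] at this; omega
        rw [hdiv, hmod]
        simp only [List.reverse_cons, List.append_assoc, List.cons_append, List.nil_append,
          pvLabelB_eq, pvIndexToLabelA, List.append_nil]
        have hE : tldIdx * total + (index + 1) + min ((rem : Int)) (n * total - (tldIdx * total + (index + 1)))
            = tldIdx * total + index + min ((rem : Int) + 1) (n * total - (tldIdx * total + index)) := by
          omega
        have hS : tldIdx * total + (index + 1) = tldIdx * total + index + 1 := by ring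
        rw [hE, hS]

-- the two count expressions bound ranges that are either equal or both empty
theorem pvRange_count_eq (s bs d : Int) (rem : Nat) (hrem : (rem : Int) = max 0 bs) :
    PySem.List.pyRange s (s + min (rem : Int) d) 1 =
      PySem.List.pyRange s (s + max 0 (min bs d)) 1 := by
  rcases le_or_gt (min (rem : Int) d) 0 with h | h
  · rw [PySem.List.pyRange_one_eq_nil (by omega), PySem.List.pyRange_one_eq_nil (by omega)]
  · have : min (rem : Int) d = max 0 (min bs d) := by omega
    rw [this]

theorem generate_batch_for_length_spec : Claim_equal_generate_batch_for_length := by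
  intro st length charset tlds batch_size _ hpre
  obtain ⟨hlen, hpre⟩ := hpre
  unfold Spec_generate_batch_for_length generate_batch_for_length generate_batch_for_length_alt
  set total : Int := (charset.toList.length : Int) ^ length.toNat with htotdef
  set tldIdx := pvStGet st "tld_index" with hti
  set index := pvStGet st "index" with hidx
  by_cases hout : pvStGet st "done" ≠ 0 ∨ total ≤ 0 ∨ tlds = []
  · simp only [if_pos hout]
  · simp only [if_neg hout]
    rw [not_or, not_or] at hout
    obtain ⟨hdone, htot, htlds⟩ := hout
    have htot' : 0 < total := by omega
    have hn : (0 : Int) < (tlds.length : Int) := by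
      simp only [Nat.cast_pos, List.length_pos_iff]; exact htlds
    have hcount : ∀ s : Int,
        PySem.List.pyRange s (s + min ((batch_size.toNat : Int)) ((tlds.length : Int) * total - s)) 1 =
        PySem.List.pyRange s (s + max 0 (min batch_size ((tlds.length : Int) * total - s))) 1 := by
      intro s; exact pvRange_count_eq s batch_size _ batch_size.toNat (by omega)
    rcases hpre with hearly | ⟨h0, h2, h3⟩
    · -- only batch_size ≤ 0 can remain of the early disjunct
      have hbs : batch_size ≤ 0 := by
        rcases hearly with h | h | h | h
        · exact absurd h hdone
        · omega
        · exact absurd h htlds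
        · exact h
      have hrem : batch_size.toNat = 0 := by omega
      rw [hrem]
      rw [PySem.List.pyRange_one_eq_nil (by
        rcases le_or_gt (min batch_size ((tlds.length : Int) * total -
          (if total ≤ index then (tldIdx + 1) * total else tldIdx * total + index))) 0 with h | h
        · omega
        · omega)]
      simp [pvLoopA]
    · by_cases hge : total ≤ index
      · rw [if_pos hge, pvLoopA_ge _ _ _ _ _ _ _ _ hge,
          pvLoopA_eq total length charset tlds htot' batch_size.toNat total tldIdx []
            (by omega) le_rfl h2 (Or.inl rfl)]
        have : tldIdx * total + total = (tldIdx + 1) * total := by ring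
        rw [this, hcount ((tldIdx + 1) * total)]
        simp
      · have h3' : tldIdx < (tlds.length : Int) := by omega
        rw [if_neg hge,
          pvLoopA_eq total length charset tlds htot' batch_size.toNat index tldIdx []
            h0 (by omega) h2 (Or.inr h3'),
          hcount (tldIdx * total + index)]
        simp
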